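-- pv_equiv track=rewrite | github.com/Tragoedie/on_server_learning | 28_tasks/odometr.py | odometer
-- ===== SOURCE A (Python) =====
-- def odometer(oksana):
--     IsArrayValid = len(oksana) % 2 != 0 or len(oksana) < 2 or oksana[0] < 0 or oksana[1] <= 0
--     if IsArrayValid:
--         return -1
--     S = oksana[0] * oksana[1]
--     for i in range(2, len(oksana), 2):
--         if oksana[i] < 0 or oksana[i+1] <= oksana[i-1]:
--             return -1
--         S += oksana[i]*(oksana[i+1]-oksana[i-1])
--     return S
-- ===== SOURCE B (Python) =====
-- def odometer(oksana):
--     if len(oksana) % 2 != 0 or len(oksana) < 2: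
--         return -1
--     evens = oksana[0::2]
--     odds = oksana[1::2]
--     prevs = [0] + odds  # previous odd value for each pair; zip truncates the extra tail
--     if any(e < 0 for e in evens) or any(b <= p for b, p in zip(odds, prevs)):
--         return -1
--     return sum(e * (b - p) for e, b, p in zip(evens, odds, prevs))
-- ===== Notes on version B (the rewrite author's own statement) =====
-- stated objective: alternative
-- what changed: Instead of A's single index loop that checks and accumulates each pair in place, B slices the array into the even-indexed readings and the odd-indexed checkpoints, pairs each checkpoint with its predecessor (0 prepended, which subsumes A's special header checks on oksana[0] and oksana[1]), validates the whole structure with two any() scans over the slices, and computes the result as one sum over the zipped triples.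
import Mathlib
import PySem

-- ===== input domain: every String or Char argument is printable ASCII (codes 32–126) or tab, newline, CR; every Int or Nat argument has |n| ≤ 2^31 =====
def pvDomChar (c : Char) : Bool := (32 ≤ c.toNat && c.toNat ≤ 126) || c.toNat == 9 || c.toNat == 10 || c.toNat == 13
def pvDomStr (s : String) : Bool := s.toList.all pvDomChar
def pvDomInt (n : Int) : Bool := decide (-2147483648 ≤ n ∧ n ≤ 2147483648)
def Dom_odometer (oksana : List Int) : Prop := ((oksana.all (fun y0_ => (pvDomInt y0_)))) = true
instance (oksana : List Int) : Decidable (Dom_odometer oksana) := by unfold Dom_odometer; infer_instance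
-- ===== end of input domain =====

-- B replaces A's fused index loop by a slice-and-zip formulation: even/odd slices,
-- each checkpoint zipped with its predecessor (0 prepended), two any() validity scans,
-- one zipped sum (objective: alternative).

-- ===== PORT A =====
-- A's 'for i in range(2, len, 2)' with early return, transcribed structurally:
-- 'prev' is oksana[i-1], 'rest' is the suffix oksana[i:], pairs (a, b) = (oksana[i], oksana[i+1]).
def odometerLoopA (prev : Int) (rest : List Int) (S : Int) : Int :=
  match rest with
  | a :: b :: rest' =>
      if a < 0 ∨ b ≤ prev then -1
      else odometerLoopA b rest' (S + a * (b - prev))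
  | _ => S

def odometer (oksana : List Int) : Int :=
  if oksana.length % 2 ≠ 0 ∨ oksana.length < 2 then -1
  else if oksana[0]! < 0 ∨ oksana[1]! ≤ 0 then -1
  else odometerLoopA oksana[1]! (oksana.drop 2) (oksana[0]! * oksana[1]!)

-- ===== PORT B =====
-- oksana[0::2] (hand port of the step-2 slice; exact: takes indices 0,2,4,…)
def pvEvens : List Int → List Int
  | [] => []
  | [a] => [a]
  | a :: _ :: t => a :: pvEvens t

-- oksana[1::2] (hand port of the step-2 slice; exact: takes indices 1,3,5,…)
def pvOdds : List Int → List Int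
  | _ :: b :: t => b :: pvOdds t
  | _ => []

def odometer_alt (oksana : List Int) : Int :=
  if oksana.length % 2 ≠ 0 ∨ oksana.length < 2 then -1
  else
    let evens := pvEvens oksana
    let odds := pvOdds oksana
    let prevs := 0 :: odds    -- [0] + odds; List.zip truncates like Python's zip
    if evens.any (fun e => decide (e < 0)) ∨
       (odds.zip prevs).any (fun p => decide (p.1 ≤ p.2)) then -1
    else ((evens.zip (odds.zip prevs)).map (fun t => t.1 * (t.2.1 - t.2.2))).sum

-- ===== PRECONDITION & SPEC =====
def Spec_odometer (oksana : List Int) (out : Int) : Prop := out = odometer_alt oksana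
instance (oksana : List Int) (out : Int) : Decidable (Spec_odometer oksana out) := by unfold Spec_odometer; infer_instance

-- ===== CLAIM (what is proved, stated in full; the proofs are below) =====
def Claim_equal_odometer : Prop := ∀ (oksana : List Int), Dom_odometer oksana → Spec_odometer oksana (odometer oksana)

-- ===== LEMMAS AND PROOFS =====
theorem odometerLoopA_eq (prev : Int) (rest : List Int) (S : Int) (h : rest.length % 2 = 0) :
    odometerLoopA prev rest S =
      if (pvEvens rest).any (fun e => decide (e < 0)) ∨
         ((pvOdds rest).zip (prev :: pvOdds rest)).any (fun p => decide (p.1 ≤ p.2)) then -1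
      else S + (((pvEvens rest).zip ((pvOdds rest).zip (prev :: pvOdds rest))).map
                  (fun t => t.1 * (t.2.1 - t.2.2))).sum := by
  fun_induction odometerLoopA prev rest S with
  | case1 prev S a b rest' hbad =>
      simp only [pvEvens, pvOdds, List.zip_cons_cons, List.any_cons]
      rcases hbad with hb | hb <;> simp [hb]
  | case2 prev S a b rest' hok ih =>
      simp only [not_or, not_lt, not_le] at hok
      simp only [List.length_cons] at h
      simp only [pvEvens, pvOdds, List.zip_cons_cons, List.any_cons, List.map_cons, List.sum_cons]
      rw [ih (by omega)]
      have h1 : ¬ (a < 0) := by omega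
      have h2 : ¬ (b ≤ prev) := by omega
      simp only [h1, h2, decide_false, Bool.false_or]
      split
      · rfl
      · ring
  | case3 rest prev S hno =>
      match rest, hno with
      | [], _ => simp [pvEvens, pvOdds]
      | [a], _ => simp at h
      | a :: b :: t, hno => exact absurd rfl (hno a b t)

-- ===== VERDICT (by name: the statement is the Claim_ definition above) =====
theorem odometer_spec : Claim_equal_odometer := by
  intro oksana _
  unfold Spec_odometer odometer odometer_alt
  split
  · rfl
  · rename_i hgood
    simp only [not_or, not_not, not_lt] at hgood
    obtain ⟨hmod, hlen⟩ := hgood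
    match oksana, hmod, hlen with
    | a :: b :: t, hmod, _ =>
      simp only [List.length_cons] at hmod
      have ht : t.length % 2 = 0 := by omega
      simp only [pvEvens, pvOdds, List.drop_succ_cons, List.drop_zero,
        List.getElem!_cons_zero, List.getElem!_cons_succ, List.zip_cons_cons,
        List.any_cons, List.map_cons, List.sum_cons]
      rw [odometerLoopA_eq b t (a * b) ht]
      by_cases h1 : a < 0
      · simp [h1]
      · by_cases h2 : b ≤ 0
        · simp [h1, h2]
        · simp only [h1, h2, decide_false, Bool.false_or, false_or]
          by_cases hc : (((pvEvens t).any fun e => decide (e < 0)) = true ∨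
              (((pvOdds t).zip (b :: pvOdds t)).any fun p => decide (p.1 ≤ p.2)) = true)
          · simp
          · simp only [if_neg hc]
            ring_nf
            simp
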